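-- pv_equiv track=rewrite | github.com/mmh132/ProjectEuler | work/P347.py | f
-- ===== SOURCE A (Python) =====
-- from math import isqrt
--
-- def f(n):
--     p = [1]*(n+1)
--     for i in range(2, isqrt(n)+1):
--         if not p[i]: continue
--         for k in range(i*i, n+1, i):
--             p[k] = 0
--     rv = 0
--     checker = [1]*(n+1)
--     for d in range(1, n+1):
--         for nd in range(1, n//d):
--             if not p[d + nd]:
--                 checker[nd*d] = 0
--     for i in range(len(checker)):
--         if checker[i]:
--             rv += i
--     return rv
-- ===== SOURCE B (Python) =====
-- from math import isqrt
--
-- def f(n):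
--     # Same prime sieve as A (p[0] and p[1] stay 1, as A has it).
--     p = [1]*(n+1)
--     for i in range(2, isqrt(n)+1):
--         if not p[i]: continue
--         for k in range(i*i, n+1, i):
--             p[k] = 0
--     # Gather: list every m's divisors once, then keep m iff every divisor
--     # pair (d, m//d) with m + d <= n has a prime sum d + m//d.
--     # (A's bound nd < n//d for m = nd*d is exactly m + d <= n.)
--     divs = [[] for _ in range(n+1)]
--     for d in range(1, n+1):
--         for m in range(d, n+1, d):
--             divs[m].append(d)
--     return sum(m for m in range(n+1)
--                if all(p[d + m//d] for d in divs[m] if m + d <= n))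
-- ===== Notes on version B (the rewrite author's own statement) =====
-- stated objective: alternative
-- what changed: Replaces A's scatter (marking checker[nd*d]=0 for every pair d,nd with nd<n//d and d+nd non-prime) by a gather: a divisor-list sieve gives each m its divisors once, and m is kept iff every divisor d with m+d<=n (the closed form of nd<n//d) has d+m//d prime; the answer is a single comprehension sum.
import Mathlib
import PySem

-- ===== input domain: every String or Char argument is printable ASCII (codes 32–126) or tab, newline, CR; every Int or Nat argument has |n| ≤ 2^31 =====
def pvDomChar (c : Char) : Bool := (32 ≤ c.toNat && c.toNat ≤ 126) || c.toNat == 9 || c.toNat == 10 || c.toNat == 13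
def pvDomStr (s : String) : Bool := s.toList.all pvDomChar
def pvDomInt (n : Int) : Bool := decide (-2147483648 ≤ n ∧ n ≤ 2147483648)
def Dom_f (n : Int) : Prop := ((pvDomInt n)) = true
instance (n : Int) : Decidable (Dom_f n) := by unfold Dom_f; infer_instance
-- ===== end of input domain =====

-- B replaces A's scatter loop (mark checker[nd*d]=0 when d+nd is not prime) by a
-- divisor-list sieve and a per-m gather over its divisors; same O(n log n) cost
-- (objective: alternative).

-- ===== PORT A =====
-- Both Pythons begin with the identical prime sieve, ported once here.
-- range(2, isqrt(n)+1) has Nat.sqrt N - 1 elements; range(i*i, n+1, i) has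
-- (N - i*i)/i + 1 elements when i*i ≤ N, else none.
def pvSieve (N : Nat) : List Nat :=
  (List.range' 2 (Nat.sqrt N - 1)).foldl
    (fun p i =>
      if p.getD i 0 = 0 then p
      else (List.range' (i * i) (if i * i ≤ N then (N - i * i) / i + 1 else 0) i).foldl
             (fun p k => p.set k 0) p)
    (List.replicate (N + 1) (1 : Nat))

def f (n : Int) : Int :=
  let N := n.toNat
  let p := pvSieve N
  let checker :=
    (List.range' 1 N).foldl
      (fun c d =>
        (List.range' 1 (N / d - 1)).foldl
          (fun c nd => if p.getD (d + nd) 0 = 0 then c.set (nd * d) 0 else c) c)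
      (List.replicate (N + 1) (1 : Nat))
  (((List.range (N + 1)).foldl
      (fun rv i => if checker.getD i 0 ≠ 0 then rv + i else rv) 0 : Nat) : Int)

-- ===== PORT B =====
-- divs[m] collects every divisor of m once (for d in 1..N: for m in d, 2d, … ≤ N).
def pvDivs (N : Nat) : List (List Nat) :=
  (List.range' 1 N).foldl
    (fun dv d =>
      (List.range' d ((N - d) / d + 1) d).foldl
        (fun dv m => dv.set m (dv.getD m [] ++ [d])) dv)
    (List.replicate (N + 1) ([] : List Nat))

-- all(p[d + m//d] for d in divs[m] if m + d <= n)
def pvGood (N : Nat) (p : List Nat) (divs : List (List Nat)) (m : Nat) : Bool :=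
  (divs.getD m []).all (fun d => if m + d ≤ N then p.getD (d + m / d) 0 != 0 else true)

def f_alt (n : Int) : Int :=
  let N := n.toNat
  let p := pvSieve N
  let divs := pvDivs N
  ((((List.range (N + 1)).filter (fun m => pvGood N p divs m)).sum : Nat) : Int)

-- ===== PRECONDITION & SPEC =====
-- Pre_f: n ≥ 0 — on negative n the Python A raises ValueError (isqrt of a negative).
def Pre_f (n : Int) : Prop := 0 ≤ n
instance (n : Int) : Decidable (Pre_f n) := by unfold Pre_f; infer_instance
def pvWitness_f : Int := 6

def Spec_f (n : Int) (out : Int) : Prop := out = f_alt n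
instance (n : Int) (out : Int) : Decidable (Spec_f n out) := by unfold Spec_f; infer_instance

-- ===== CLAIM (what is proved, stated in full; the proofs are below) =====
def Claim_equal_f : Prop := ∀ (n : Int), Dom_f n → Pre_f n → Spec_f n (f n)

-- ===== LEMMAS AND PROOFS =====

-- After a fold that zeroes position idx a whenever cond a holds, a cell reads 0
-- iff some list element zeroed it or it was 0 already (out-of-range reads are 0 anyway).
theorem foldl_set_zero_getD {α : Type} (L : List α) (cond : α → Prop) [DecidablePred cond]
    (idx : α → Nat) (c : List Nat) (i : Nat) :
    (L.foldl (fun c a => if cond a then c.set (idx a) 0 else c) c).getD i 0 = 0 ↔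
      (∃ a ∈ L, cond a ∧ idx a = i) ∨ c.getD i 0 = 0 := by
  induction L generalizing c with
  | nil => simp
  | cons a L ih =>
    simp only [List.foldl_cons, ih, List.mem_cons]
    constructor
    · rintro (⟨b, hb, hc, hi⟩ | h0)
      · exact Or.inl ⟨b, Or.inr hb, hc, hi⟩
      · by_cases hca : cond a
        · simp only [if_pos hca] at h0
          by_cases hii : idx a = i
          · exact Or.inl ⟨a, Or.inl rfl, hca, hii⟩
          · rw [List.getD_eq_getElem?_getD, List.getElem?_set_ne hii,
                ← List.getD_eq_getElem?_getD] at h0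
            exact Or.inr h0
        · simp only [if_neg hca] at h0; exact Or.inr h0
    · rintro (⟨b, (rfl | hb), hc, hi⟩ | h0)
      · right
        simp only [if_pos hc]
        subst hi
        by_cases hlen : idx b < c.length
        · rw [List.getD_eq_getElem?_getD, List.getElem?_set_self hlen]; rfl
        · rw [List.getD_eq_getElem?_getD, List.getElem?_eq_none (by
            simpa [List.length_set] using Nat.le_of_not_lt hlen)]; rfl
      · exact Or.inl ⟨b, hb, hc, hi⟩
      · right
        by_cases hca : cond a
        · simp only [if_pos hca]
          by_cases hii : idx a = i
          · subst hii
            by_cases hlen : idx a < c.length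
            · rw [List.getD_eq_getElem?_getD, List.getElem?_set_self hlen]; rfl
            · rw [List.getD_eq_getElem?_getD, List.getElem?_eq_none (by
                simpa [List.length_set] using Nat.le_of_not_lt hlen)]; rfl
          · rw [List.getD_eq_getElem?_getD, List.getElem?_set_ne hii,
                ← List.getD_eq_getElem?_getD]
            exact h0
        · simpa only [if_neg hca] using h0

-- After a fold that appends val a at position idx a (all indices in range), a cell's
-- members are the appended values plus whatever was there before.
theorem foldl_set_append_mem {α : Type} (L : List α) (idx : α → Nat) (val : α → Nat)
    (dv : List (List Nat)) (h : ∀ a ∈ L, idx a < dv.length) (m d : Nat) :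
    d ∈ (L.foldl (fun dv a => dv.set (idx a) (dv.getD (idx a) [] ++ [val a])) dv).getD m [] ↔
      (∃ a ∈ L, idx a = m ∧ val a = d) ∨ d ∈ dv.getD m [] := by
  induction L generalizing dv with
  | nil => simp
  | cons a L ih =>
    have hlen : (dv.set (idx a) (dv.getD (idx a) [] ++ [val a])).length = dv.length := by
      simp
    have h' : ∀ b ∈ L, idx b < (dv.set (idx a) (dv.getD (idx a) [] ++ [val a])).length := by
      intro b hb; rw [hlen]; exact h b (List.mem_cons_of_mem a hb)
    simp only [List.foldl_cons, ih _ h', List.mem_cons]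
    have hstep : d ∈ (dv.set (idx a) (dv.getD (idx a) [] ++ [val a])).getD m [] ↔
        (idx a = m ∧ val a = d) ∨ d ∈ dv.getD m [] := by
      by_cases hii : idx a = m
      · subst hii
        rw [List.getD_eq_getElem?_getD,
            List.getElem?_set_self (h a (List.mem_cons_self)), Option.getD_some,
            List.mem_append, List.mem_singleton]
        constructor
        · rintro (hin | rfl)
          · exact Or.inr hin
          · exact Or.inl ⟨rfl, rfl⟩
        · rintro (⟨-, rfl⟩ | hin)
          · exact Or.inr rfl
          · exact Or.inl hin
      · rw [List.getD_eq_getElem?_getD, List.getElem?_set_ne hii,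
            ← List.getD_eq_getElem?_getD]
        constructor
        · exact fun hin => Or.inr hin
        · rintro (⟨hm, -⟩ | hin)
          · exact absurd hm hii
          · exact hin
    rw [hstep]
    constructor
    · rintro (⟨b, hb, hm, hv⟩ | (⟨hm, hv⟩ | hin))
      · exact Or.inl ⟨b, Or.inr hb, hm, hv⟩
      · exact Or.inl ⟨a, Or.inl rfl, hm, hv⟩
      · exact Or.inr hin
    · rintro (⟨b, (rfl | hb), hm, hv⟩ | hin)
      · exact Or.inr (Or.inl ⟨hm, hv⟩)
      · exact Or.inl ⟨b, hb, hm, hv⟩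
      · exact Or.inr (Or.inr hin)

-- range(d0, N+1, d0), for 1 ≤ d0 ≤ N, lists exactly the multiples of d0 in [d0, N].
theorem mem_multiples (N d0 m : Nat) (h1 : 1 ≤ d0) (hN : d0 ≤ N) :
    m ∈ List.range' d0 ((N - d0) / d0 + 1) d0 ↔ d0 ≤ m ∧ m ≤ N ∧ d0 ∣ m := by
  rw [List.mem_range']
  constructor
  · rintro ⟨i, hi, rfl⟩
    have hi' : i ≤ (N - d0) / d0 := by omega
    have hmul : i * d0 ≤ N - d0 := (Nat.le_div_iff_mul_le h1).1 hi'
    have hmul2 : d0 * i ≤ N - d0 := by rw [Nat.mul_comm]; exact hmul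
    exact ⟨by omega, by omega, ⟨1 + i, by ring⟩⟩
  · rintro ⟨hdm, hmN, k, rfl⟩
    have hk : 1 ≤ k := by
      rcases Nat.eq_zero_or_pos k with rfl | hk
      · omega
      · exact hk
    have hd0k : d0 ≤ d0 * k := Nat.le_mul_of_pos_right d0 hk
    have e1 : (k - 1) * d0 = k * d0 - d0 := by rw [Nat.sub_mul, Nat.one_mul]
    have e2 : k * d0 = d0 * k := Nat.mul_comm k d0
    have h2 : (k - 1) * d0 ≤ N - d0 := by rw [e1, e2]; omega
    have h3 : k - 1 ≤ (N - d0) / d0 := (Nat.le_div_iff_mul_le h1).2 h2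
    have e3 : d0 * (k - 1) = d0 * k - d0 := by rw [Nat.mul_sub, Nat.mul_one]
    exact ⟨k - 1, by omega, by omega⟩

-- divs[m] holds exactly the positive divisors of m (for m ≤ N).
theorem mem_pvDivs (N m d : Nat) (hm : m ≤ N) :
    d ∈ (pvDivs N).getD m [] ↔ 1 ≤ d ∧ d ≤ m ∧ d ∣ m := by
  unfold pvDivs
  rw [show
      ((List.range' 1 N).foldl
        (fun dv d =>
          (List.range' d ((N - d) / d + 1) d).foldl
            (fun dv m => dv.set m (dv.getD m [] ++ [d])) dv)
        (List.replicate (N + 1) ([] : List Nat)))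
      = (((List.range' 1 N).flatMap
            (fun d => (List.range' d ((N - d) / d + 1) d).map (fun m => (d, m)))).foldl
          (fun dv (pr : Nat × Nat) => dv.set pr.2 (dv.getD pr.2 [] ++ [pr.1]))
          (List.replicate (N + 1) ([] : List Nat)))
      from by rw [List.foldl_flatMap]; simp only [List.foldl_map]]
  refine (foldl_set_append_mem _ (fun pr : Nat × Nat => pr.2) (fun pr : Nat × Nat => pr.1)
      _ ?hlen m d).trans ?_
  case hlen =>
    intro pr hpr
    rw [List.mem_flatMap] at hpr
    obtain ⟨d0, hd0, hpr⟩ := hpr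
    rw [List.mem_map] at hpr
    obtain ⟨m0, hm0, rfl⟩ := hpr
    rw [List.mem_range'_1] at hd0
    have := (mem_multiples N d0 m0 (by omega) (by omega)).1 hm0
    simp only [List.length_replicate]
    omega
  have hrep : d ∈ (List.replicate (N + 1) ([] : List Nat)).getD m [] ↔ False := by
    rcases Nat.lt_or_ge m (N + 1) with hlt | hge
    · rw [List.getD_eq_getElem?_getD, List.getElem?_replicate, if_pos hlt]; simp
    · rw [List.getD_eq_getElem?_getD, List.getElem?_eq_none (by simpa using hge)]; simp
  rw [hrep, or_false]
  constructor
  · rintro ⟨pr, hpr, hm2, hd2⟩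
    rw [List.mem_flatMap] at hpr
    obtain ⟨d0, hd0, hpr⟩ := hpr
    rw [List.mem_map] at hpr
    obtain ⟨m0, hm0, rfl⟩ := hpr
    rw [List.mem_range'_1] at hd0
    obtain ⟨hle, -, hdvd⟩ := (mem_multiples N d0 m0 (by omega) (by omega)).1 hm0
    simp only at hm2 hd2
    subst hm2; subst hd2
    exact ⟨by omega, hle, hdvd⟩
  · rintro ⟨h1, hdm, hdvd⟩
    refine ⟨(d, m), ?_, rfl, rfl⟩
    rw [List.mem_flatMap]
    refine ⟨d, ?_, ?_⟩
    · rw [List.mem_range'_1]; omega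
    · rw [List.mem_map]
      exact ⟨m, (mem_multiples N d m h1 (by omega)).2 ⟨hdm, hm, hdvd⟩, rfl⟩

-- A's checker cell i (for i ≤ N) reads 0 iff some pair (d, nd) with nd*d = i,
-- 1 ≤ nd < N/d and d + nd non-prime zeroed it.
theorem checker_getD (N : Nat) (p : List Nat) (i : Nat) (hi : i < N + 1) :
    (((List.range' 1 N).foldl
      (fun c d =>
        (List.range' 1 (N / d - 1)).foldl
          (fun c nd => if p.getD (d + nd) 0 = 0 then c.set (nd * d) 0 else c) c)
      (List.replicate (N + 1) (1 : Nat))).getD i 0 = 0) ↔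
    (∃ d, 1 ≤ d ∧ d ≤ N ∧ ∃ nd, 1 ≤ nd ∧ nd < N / d ∧
        p.getD (d + nd) 0 = 0 ∧ nd * d = i) := by
  rw [show
      ((List.range' 1 N).foldl
        (fun c d =>
          (List.range' 1 (N / d - 1)).foldl
            (fun c nd => if p.getD (d + nd) 0 = 0 then c.set (nd * d) 0 else c) c)
        (List.replicate (N + 1) (1 : Nat)))
      = (((List.range' 1 N).flatMap
            (fun d => (List.range' 1 (N / d - 1)).map (fun nd => (d, nd)))).foldl
          (fun c (pr : Nat × Nat) =>
            if p.getD (pr.1 + pr.2) 0 = 0 then c.set (pr.2 * pr.1) 0 else c)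
          (List.replicate (N + 1) (1 : Nat)))
      from by rw [List.foldl_flatMap]; simp only [List.foldl_map]]
  refine (foldl_set_zero_getD _ (fun pr : Nat × Nat => p.getD (pr.1 + pr.2) 0 = 0)
      (fun pr : Nat × Nat => pr.2 * pr.1) _ i).trans ?_
  have hrep : (List.replicate (N + 1) (1 : Nat)).getD i 0 = 1 := by
    rw [List.getD_eq_getElem?_getD, List.getElem?_replicate, if_pos hi]; rfl
  rw [hrep]
  simp only [Nat.one_ne_zero, or_false]
  constructor
  · rintro ⟨pr, hpr, hp0, hidx⟩
    rw [List.mem_flatMap] at hpr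
    obtain ⟨d, hd, hpr⟩ := hpr
    rw [List.mem_map] at hpr
    obtain ⟨nd, hnd, rfl⟩ := hpr
    rw [List.mem_range'_1] at hd hnd
    exact ⟨d, by omega, by omega, nd, by omega, by omega, hp0, hidx⟩
  · rintro ⟨d, h1, hdN, nd, hnd1, hndlt, hp0, hidx⟩
    refine ⟨(d, nd), ?_, hp0, hidx⟩
    rw [List.mem_flatMap]
    refine ⟨d, by rw [List.mem_range'_1]; omega, ?_⟩
    rw [List.mem_map]
    exact ⟨nd, by rw [List.mem_range'_1]; omega, rfl⟩

-- The bound nd < N/d on the pair (d, nd) with nd*d = i is exactly i + d ≤ N.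
theorem bad_iff (N : Nat) (p : List Nat) (i : Nat) :
    (∃ d, 1 ≤ d ∧ d ≤ N ∧ ∃ nd, 1 ≤ nd ∧ nd < N / d ∧
        p.getD (d + nd) 0 = 0 ∧ nd * d = i) ↔
    (∃ d, 1 ≤ d ∧ d ≤ i ∧ d ∣ i ∧ i + d ≤ N ∧ p.getD (d + i / d) 0 = 0) := by
  constructor
  · rintro ⟨d, h1, hdN, nd, hnd1, hndlt, hp0, rfl⟩
    have h0 : 0 < d := h1
    have hmul : (nd + 1) * d ≤ N := (Nat.le_div_iff_mul_le h0).1 (by omega)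
    have hmul' : nd * d + d ≤ N := by
      have : (nd + 1) * d = nd * d + d := by ring
      omega
    have hdiv : nd * d / d = nd := Nat.mul_div_cancel nd h0
    exact ⟨d, h1, Nat.le_mul_of_pos_left d hnd1, ⟨nd, Nat.mul_comm nd d⟩, hmul',
      by rw [hdiv]; exact hp0⟩
  · rintro ⟨d, h1, hdi, hdvd, hsum, hp0⟩
    have h0 : 0 < d := h1
    have hnd : i / d * d = i := Nat.div_mul_cancel hdvd
    have hnd1 : 1 ≤ i / d := (Nat.one_le_div_iff h0).2 hdi
    have hlt : i / d < N / d := by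
      have : (i / d + 1) * d ≤ N := by
        have : (i / d + 1) * d = i / d * d + d := by ring
        omega
      have := (Nat.le_div_iff_mul_le h0).2 this
      omega
    exact ⟨d, h1, by omega, i / d, hnd1, hlt, hp0, hnd⟩

-- B's per-m test, through the divisor list.
theorem pvGood_iff (N : Nat) (p : List Nat) (m : Nat) (hm : m ≤ N) :
    pvGood N p (pvDivs N) m = true ↔
      ∀ d, 1 ≤ d → d ≤ m → d ∣ m → m + d ≤ N → ¬ p.getD (d + m / d) 0 = 0 := by
  unfold pvGood
  rw [List.all_eq_true]
  constructor
  · intro h d h1 hdm hdvd hsum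
    have := h d ((mem_pvDivs N m d hm).2 ⟨h1, hdm, hdvd⟩)
    rw [if_pos hsum, bne_iff_ne] at this
    exact this
  · intro h d hd
    obtain ⟨h1, hdm, hdvd⟩ := (mem_pvDivs N m d hm).1 hd
    by_cases hsum : m + d ≤ N
    · rw [if_pos hsum, bne_iff_ne]
      exact h d h1 hdm hdvd hsum
    · rw [if_neg hsum]

-- A conditional-accumulate fold is the sum of the filtered list.
theorem foldl_if_add (L : List Nat) (c : Nat → Prop) [DecidablePred c] (acc : Nat) :
    L.foldl (fun rv i => if c i then rv + i else rv) acc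
      = acc + (L.filter (fun i => decide (c i))).sum := by
  induction L generalizing acc with
  | nil => simp
  | cons a L ih =>
    by_cases h : c a
    · simp [h, ih]; omega
    · simp [h, ih]

theorem f_spec : Claim_equal_f := by
  intro n _ hpre
  unfold Spec_f f f_alt
  simp only
  have hfold := foldl_if_add (List.range (n.toNat + 1))
      (fun i => ((List.range' 1 n.toNat).foldl
        (fun c d =>
          (List.range' 1 (n.toNat / d - 1)).foldl
            (fun c nd =>
              if (pvSieve n.toNat).getD (d + nd) 0 = 0 then c.set (nd * d) 0 else c) c)
        (List.replicate (n.toNat + 1) (1 : Nat))).getD i 0 ≠ 0) 0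
  rw [hfold, Nat.zero_add]
  refine congrArg (fun l : List Nat => ((l.sum : Nat) : Int)) (List.filter_congr ?_)
  intro i hi
  rw [List.mem_range] at hi
  rw [Bool.eq_iff_iff, decide_eq_true_iff,
      pvGood_iff n.toNat (pvSieve n.toNat) i (by omega),
      ne_eq, checker_getD n.toNat (pvSieve n.toNat) i hi, bad_iff]
  push Not
  constructor
  · intro h d h1 hdm hdvd hsum
    exact h d h1 hdm hdvd hsum
  · intro h d h1 hdm hdvd hsum
    exact h d h1 hdm hdvd hsum
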